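-- pv_equiv track=rewrite | github.com/hflash/EEQM | circuit_slices.py | get_gates
-- ===== SOURCE A (Python) =====
-- def get_gates(layer):
--     cnot_gates = []
--     signle_gates = []
--     have_checked = [0 for i in range(len(layer))]
--     for i in range(len(layer)):
--         if layer[i] == -1 or have_checked[i]:
--             continue
--         is_signle = True
--         for j in range(i+1, len(layer)):
--             if layer[i] == layer[j]:
--                 have_checked[j] = 1
--                 is_signle = False
--                 cnot_gates.append([i, j, layer[i]])
--                 break
--         if is_signle:
--             signle_gates.append([i, layer[i]])
--     return signle_gates, cnot_gates
-- ===== SOURCE B (Python) =====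
-- def get_gates(layer):
--     pending = {}          # value -> index of its unpaired ("open") occurrence
--     pairs = []
--     for i, v in enumerate(layer):
--         if v == -1:
--             continue
--         if v in pending:
--             pairs.append((pending.pop(v), i, v))
--         else:
--             pending[v] = i
--     pairs.sort(key=lambda p: p[0])
--     opens = sorted(((i, v) for v, i in pending.items()), key=lambda p: p[0])
--     return [[i, v] for i, v in opens], [[a, b, v] for a, b, v in pairs]
-- ===== Notes on version B (the rewrite author's own statement) =====
-- stated objective: faster
-- what changed: A's nested scan over the layer with a have_checked marker array is replaced by a single pass that pairs each value with its pending unpaired occurrence kept in a dict, followed by key-sorts of the collected cnot pairs (by opener index) and pending singles (by index).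
import Mathlib
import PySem

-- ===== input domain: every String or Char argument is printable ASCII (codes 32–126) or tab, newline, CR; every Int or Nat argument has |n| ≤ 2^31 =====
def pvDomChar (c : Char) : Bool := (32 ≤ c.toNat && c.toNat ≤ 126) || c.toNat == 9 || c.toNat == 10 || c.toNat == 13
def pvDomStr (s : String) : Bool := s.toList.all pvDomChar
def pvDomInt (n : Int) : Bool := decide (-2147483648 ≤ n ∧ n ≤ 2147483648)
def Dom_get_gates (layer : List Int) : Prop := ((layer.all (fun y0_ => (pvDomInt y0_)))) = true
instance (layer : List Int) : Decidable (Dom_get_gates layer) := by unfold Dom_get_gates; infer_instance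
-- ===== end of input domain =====

-- B replaces A's quadratic scan-and-mark pairing by a single pass with a dict of pending (unpaired)
-- values plus two key-sorts of the collected gates; same return value, proved equal below.

-- ===== PORT A =====
-- Inner loop of A: 'for j in range(i+1, len(layer)): if layer[i] == layer[j]: have_checked[j] = 1; …; break'.
-- Returns (updated have_checked, the matching j if any); i and j lie in range(len(layer)), so layer[j] is read
-- with pyGetD (exact here) and 'have_checked[j] = 1' is List.set at j.toNat (j ≥ 0).
def getGatesScan (layer : List Int) (v : Int) (js : List Int) (checked : List Int) : List Int × Option Int :=
  match js with
  | [] => (checked, none)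
  | j :: rest =>
    if PySem.List.pyGetD layer j 0 = v then (checked.set j.toNat 1, some j)
    else getGatesScan layer v rest checked

def get_gates (layer : List Int) : List (List Int) × List (List Int) :=
  let n := PySem.List.len layer
  let st := (PySem.List.pyRange 0 n).foldl
    (fun (st : List (List Int) × List (List Int) × List Int) i =>
      let cnot := st.1; let single := st.2.1; let checked := st.2.2
      if PySem.List.pyGetD layer i 0 = -1 ∨ PySem.List.pyGetD checked i 0 ≠ 0 then st
      else
        match getGatesScan layer (PySem.List.pyGetD layer i 0) (PySem.List.pyRange (i+1) n) checked with
        | (checked', some j) => (cnot ++ [[i, j, PySem.List.pyGetD layer i 0]], single, checked')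
        | (checked', none)   => (cnot, single ++ [[i, PySem.List.pyGetD layer i 0]], checked'))
    ([], [], (PySem.List.pyRange 0 n).map (fun _ => 0))
  (st.2.1, st.1)

-- ===== PORT B =====
def get_gates_alt (layer : List Int) : List (List Int) × List (List Int) :=
  let st := (PySem.List.enumerate layer).foldl
    (fun (st : PySem.Dict Int Int × List (Int × Int × Int)) iv =>
      if iv.2 = -1 then st
      else
        match st.1.get? iv.2 with
        | some j => (st.1.erase iv.2, st.2 ++ [(j, iv.1, iv.2)])
        | none   => (st.1.insert iv.2 iv.1, st.2))
    (PySem.Dict.empty, [])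
  let pairs := PySem.List.sorted st.2 (fun p => p.1)
  let opens := PySem.List.sorted (st.1.items.map (fun p => (p.2, p.1))) (fun p => p.1)
  (opens.map (fun p => [p.1, p.2]), pairs.map (fun p => [p.1, p.2.1, p.2.2]))

-- ===== PRECONDITION & SPEC =====
def Spec_get_gates (layer : List Int) (out : List (List Int) × List (List Int)) : Prop := out = get_gates_alt layer
instance (layer : List Int) (out : List (List Int) × List (List Int)) : Decidable (Spec_get_gates layer out) := by unfold Spec_get_gates; infer_instance

-- ===== CLAIM (what is proved, stated in full; the proofs are below) =====
def Claim_equal_get_gates : Prop := ∀ (layer : List Int), Dom_get_gates layer → Spec_get_gates layer (get_gates layer)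

-- ===== LEMMAS AND PROOFS =====

-- layer[k] for a Nat index k (all reads below are in range)
def gV (layer : List Int) (k : Nat) : Int := layer.getD k 0
-- number of occurrences of w among layer[0..t-1]
def cntW (layer : List Int) (t : Nat) (w : Int) : Nat := (layer.take t).count w
-- last index < t holding w
def lstO (layer : List Int) (t : Nat) (w : Int) : Option Nat :=
  ((List.range t).reverse).find? (fun i => gV layer i == w)
-- previous occurrence of layer[j]
def prvO (layer : List Int) (j : Nat) : Option Nat := lstO layer j (gV layer j)
-- next occurrence of layer[k]
def nxtO (layer : List Int) (k : Nat) : Option Nat :=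
  (List.range' (k+1) (layer.length - (k+1))).find? (fun m => gV layer m == gV layer k)
-- k opens a gate: not -1, evenly many earlier occurrences of its value
def isOpB (layer : List Int) (k : Nat) : Bool := (gV layer k != -1) && (cntW layer k (gV layer k) % 2 == 0)
def isClB (layer : List Int) (j : Nat) : Bool := (gV layer j != -1) && (cntW layer j (gV layer j) % 2 == 1)
-- no occurrence of layer[i] strictly between i and t
def noccB (layer : List Int) (i t : Nat) : Bool :=
  (List.range' (i+1) (t - (i+1))).all (fun m => gV layer m != gV layer i)
-- i is a still-unpaired opener at time t
def openB (layer : List Int) (t i : Nat) : Bool := isOpB layer i && noccB layer i t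

def fC (layer : List Int) (k : Nat) : Option (Int × Int × Int) :=
  if isOpB layer k then (nxtO layer k).map (fun j : Nat => ((k:Int), (j:Int), gV layer k)) else none
def canCt (layer : List Int) (t : Nat) : List (Int × Int × Int) := (List.range t).filterMap (fC layer)
def fS (layer : List Int) (k : Nat) : Option (Int × Int) :=
  if isOpB layer k && (nxtO layer k).isNone then some ((k:Int), gV layer k) else none
def canSt (layer : List Int) (t : Nat) : List (Int × Int) := (List.range t).filterMap (fS layer)
def fP (layer : List Int) (j : Nat) : Option (Int × Int × Int) :=
  if isClB layer j then (prvO layer j).map (fun i : Nat => ((i:Int), (j:Int), gV layer j)) else none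
def pairsS (layer : List Int) (t : Nat) : List (Int × Int × Int) := (List.range t).filterMap (fP layer)
def fI (layer : List Int) (t i : Nat) : Option (Int × Int) :=
  if openB layer t i then some (gV layer i, (i:Int)) else none
def itemsS (layer : List Int) (t : Nat) : List (Int × Int) := (List.range t).filterMap (fI layer t)
def chkF (layer : List Int) (t j : Nat) : Int :=
  if isClB layer j && (match prvO layer j with | some i => decide (i < t) | none => false) then 1 else 0
def chkS (layer : List Int) (t : Nat) : List Int := (List.range layer.length).map (chkF layer t)

def pairToL3 (p : Int × Int × Int) : List Int := [p.1, p.2.1, p.2.2]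
def pairToL2 (p : Int × Int) : List Int := [p.1, p.2]

-- the loop bodies of the two ports, named for the invariant proofs
def stepA (layer : List Int) (st : List (List Int) × List (List Int) × List Int) (i : Int) :
    List (List Int) × List (List Int) × List Int :=
  let cnot := st.1; let single := st.2.1; let checked := st.2.2
  if PySem.List.pyGetD layer i 0 = -1 ∨ PySem.List.pyGetD checked i 0 ≠ 0 then st
  else
    match getGatesScan layer (PySem.List.pyGetD layer i 0) (PySem.List.pyRange (i+1) (PySem.List.len layer)) checked with
    | (checked', some j) => (cnot ++ [[i, j, PySem.List.pyGetD layer i 0]], single, checked')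
    | (checked', none)   => (cnot, single ++ [[i, PySem.List.pyGetD layer i 0]], checked')

def stepB (st : PySem.Dict Int Int × List (Int × Int × Int)) (iv : Int × Int) :
    PySem.Dict Int Int × List (Int × Int × Int) :=
  if iv.2 = -1 then st
  else
    match st.1.get? iv.2 with
    | some j => (st.1.erase iv.2, st.2 ++ [(j, iv.1, iv.2)])
    | none   => (st.1.insert iv.2 iv.1, st.2)

lemma find?_asc {l : List Nat} (hl : l.Pairwise (· < ·)) {p : Nat → Bool} {x : Nat} :
    l.find? p = some x ↔ (x ∈ l ∧ p x = true ∧ ∀ y ∈ l, p y = true → x ≤ y) := by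
  induction l with
  | nil => simp
  | cons a l ih =>
    rw [List.pairwise_cons] at hl
    by_cases hpa : p a = true
    · rw [List.find?_cons_of_pos hpa]
      constructor
      · rintro h
        injection h with h; subst h
        refine ⟨List.mem_cons_self, hpa, ?_⟩
        intro y hy _
        rcases List.mem_cons.1 hy with rfl | hy
        · exact le_rfl
        · exact Nat.le_of_lt (hl.1 y hy)
      · rintro ⟨hx, hpx, hmin⟩
        have hxa : x ≤ a := hmin a List.mem_cons_self hpa
        rcases List.mem_cons.1 hx with rfl | hx
        · rfl
        · exact absurd (hl.1 x hx) (by omega)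
    · rw [List.find?_cons_of_neg hpa, ih hl.2]
      constructor
      · rintro ⟨hx, hpx, hmin⟩
        refine ⟨List.mem_cons_of_mem _ hx, hpx, ?_⟩
        intro y hy hpy
        rcases List.mem_cons.1 hy with rfl | hy
        · exact absurd hpy hpa
        · exact hmin y hy hpy
      · rintro ⟨hx, hpx, hmin⟩
        rcases List.mem_cons.1 hx with rfl | hx
        · exact absurd hpx hpa
        · exact ⟨hx, hpx, fun y hy hpy => hmin y (List.mem_cons_of_mem _ hy) hpy⟩

lemma find?_desc {l : List Nat} (hl : l.Pairwise (· > ·)) {p : Nat → Bool} {x : Nat} :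
    l.find? p = some x ↔ (x ∈ l ∧ p x = true ∧ ∀ y ∈ l, p y = true → y ≤ x) := by
  induction l with
  | nil => simp
  | cons a l ih =>
    rw [List.pairwise_cons] at hl
    by_cases hpa : p a = true
    · rw [List.find?_cons_of_pos hpa]
      constructor
      · rintro h
        injection h with h; subst h
        refine ⟨List.mem_cons_self, hpa, ?_⟩
        intro y hy _
        rcases List.mem_cons.1 hy with rfl | hy
        · exact le_rfl
        · exact Nat.le_of_lt (hl.1 y hy)
      · rintro ⟨hx, hpx, hmin⟩
        have hxa : a ≤ x := hmin a List.mem_cons_self hpa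
        rcases List.mem_cons.1 hx with rfl | hx
        · rfl
        · exact absurd (hl.1 x hx) (by omega)
    · rw [List.find?_cons_of_neg hpa, ih hl.2]
      constructor
      · rintro ⟨hx, hpx, hmin⟩
        refine ⟨List.mem_cons_of_mem _ hx, hpx, ?_⟩
        intro y hy hpy
        rcases List.mem_cons.1 hy with rfl | hy
        · exact absurd hpy hpa
        · exact hmin y hy hpy
      · rintro ⟨hx, hpx, hmin⟩
        rcases List.mem_cons.1 hx with rfl | hx
        · exact absurd hpx hpa
        · exact ⟨hx, hpx, fun y hy hpy => hmin y (List.mem_cons_of_mem _ hy) hpy⟩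

lemma lstO_some_iff {layer : List Int} {t : Nat} {w : Int} {i : Nat} :
    lstO layer t w = some i ↔ (i < t ∧ gV layer i = w ∧ ∀ m, i < m → m < t → gV layer m ≠ w) := by
  unfold lstO
  rw [find?_desc (List.pairwise_reverse.2 (by simpa using List.pairwise_lt_range))]
  simp only [List.mem_reverse, List.mem_range, beq_iff_eq]
  constructor
  · rintro ⟨hi, hv, hmax⟩
    refine ⟨hi, hv, ?_⟩
    intro m him hmt hm
    exact absurd (hmax m hmt hm) (by omega)
  · rintro ⟨hi, hv, hno⟩
    refine ⟨hi, hv, ?_⟩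
    intro y hy hpy
    by_contra hxy
    exact hno y (by omega) hy hpy

lemma nxtO_some_iff {layer : List Int} {k j : Nat} :
    nxtO layer k = some j ↔
      (k < j ∧ j < layer.length ∧ gV layer j = gV layer k ∧
        ∀ m, k < m → m < j → gV layer m ≠ gV layer k) := by
  unfold nxtO
  rw [find?_asc (List.pairwise_lt_range' 1)]
  simp only [List.mem_range'_1, beq_iff_eq]
  constructor
  · rintro ⟨⟨hkj, hjn⟩, hv, hmin⟩
    refine ⟨hkj, by omega, hv, ?_⟩
    intro m hkm hmj hm
    have := hmin m ⟨hkm, by omega⟩ hm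
    omega
  · rintro ⟨hkj, hjn, hv, hno⟩
    refine ⟨⟨hkj, by omega⟩, hv, ?_⟩
    intro y ⟨hky, hyn⟩ hpy
    by_contra hxy
    exact hno y hky (by omega) hpy

lemma nxtO_none_iff {layer : List Int} {k : Nat} :
    nxtO layer k = none ↔ ∀ m, k < m → m < layer.length → gV layer m ≠ gV layer k := by
  unfold nxtO
  rw [List.find?_eq_none]
  simp only [List.mem_range'_1, beq_iff_eq]
  constructor
  · intro h m hkm hmn
    exact h m ⟨hkm, by omega⟩
  · rintro h m ⟨hkm, hmn⟩
    exact h m hkm (by omega)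

lemma noccB_iff {layer : List Int} {i t : Nat} :
    noccB layer i t = true ↔ ∀ m, i < m → m < t → gV layer m ≠ gV layer i := by
  unfold noccB
  rw [List.all_eq_true]
  simp only [List.mem_range'_1, bne_iff_ne]
  constructor
  · intro h m him hmt
    exact h m ⟨him, by omega⟩
  · rintro h m ⟨him, hmt⟩
    exact h m him (by omega)

lemma cnt_succ {layer : List Int} {t : Nat} {w : Int} (ht : t < layer.length) :
    cntW layer (t+1) w = cntW layer t w + (if gV layer t = w then 1 else 0) := by
  unfold cntW
  have hg : gV layer t = layer[t] := List.getD_eq_getElem layer 0 ht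
  rw [List.take_add_one, List.getElem?_eq_getElem ht]
  simp only [Option.toList_some, List.count_append, List.count_cons, List.count_nil, hg]
  by_cases h : layer[t] = w
  · simp [h]
  · simp [h]

lemma cnt_adj {layer : List Int} {i t : Nat} {w : Int} (hit : i < t) (ht : t ≤ layer.length)
    (hw : gV layer i = w) (hno : ∀ m, i < m → m < t → gV layer m ≠ w) :
    cntW layer t w = cntW layer i w + 1 := by
  induction t with
  | zero => omega
  | succ t ih =>
    rcases Nat.lt_succ_iff_lt_or_eq.1 hit with h | h
    · rw [cnt_succ (by omega)]
      have hne : gV layer t ≠ w := hno t h (by omega)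
      rw [if_neg hne]
      exact ih h (by omega) (fun m h1 h2 => hno m h1 (by omega))
    · subst h
      rw [cnt_succ (by omega), if_pos hw]

lemma cnt_pos_exists {layer : List Int} {t : Nat} {w : Int} (h : cntW layer t w ≠ 0) :
    ∃ i, i < t ∧ i < layer.length ∧ gV layer i = w := by
  unfold cntW at h
  have hmem : w ∈ layer.take t := by
    by_contra hmem
    exact h (List.count_eq_zero.2 hmem)
  rcases List.mem_iff_getElem.1 hmem with ⟨m, hm, hval⟩
  have hlen : m < t ∧ m < layer.length := by
    have := hm
    simp [List.length_take] at this
    omega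
  refine ⟨m, hlen.1, hlen.2, ?_⟩
  rw [gV, List.getD_eq_getElem layer 0 hlen.2, ← List.getElem_take (h := hm), hval]

lemma open_unique {layer : List Int} {t i i' : Nat} (h1 : openB layer t i = true)
    (h2 : openB layer t i' = true) (hv : gV layer i = gV layer i') (hi : i < t) (hi' : i' < t) :
    i = i' := by
  rcases lt_trichotomy i i' with h | h | h
  · rw [openB, Bool.and_eq_true] at h1
    exact absurd hv.symm ((noccB_iff.1 h1.2) i' h hi')
  · exact h
  · rw [openB, Bool.and_eq_true] at h2
    exact absurd hv ((noccB_iff.1 h2.2) i h hi)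

lemma open_of_odd {layer : List Int} {t : Nat} {w : Int} (ht : t ≤ layer.length) (hw : w ≠ -1)
    (hodd : cntW layer t w % 2 = 1) :
    ∃ i, lstO layer t w = some i ∧ i < t ∧ openB layer t i = true ∧ gV layer i = w := by
  have hne : cntW layer t w ≠ 0 := by omega
  obtain ⟨i0, hi0t, hi0n, hi0v⟩ := cnt_pos_exists hne
  have hsome : (lstO layer t w).isSome = true := by
    unfold lstO
    rw [List.find?_isSome]
    exact ⟨i0, by simp [List.mem_range, hi0t], by simp [hi0v]⟩
  rcases Option.isSome_iff_exists.1 hsome with ⟨i, hi⟩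
  obtain ⟨hit, hiv, hmax⟩ := lstO_some_iff.1 hi
  have hcnt : cntW layer t w = cntW layer i w + 1 := cnt_adj hit ht hiv hmax
  refine ⟨i, hi, hit, ?_, hiv⟩
  rw [openB, Bool.and_eq_true]
  constructor
  · rw [isOpB, Bool.and_eq_true]
    constructor
    · simp [hiv, hw]
    · simp only [beq_iff_eq, hiv]
      omega
  · rw [noccB_iff, hiv]
    exact hmax

lemma odd_of_open {layer : List Int} {t i : Nat} (ht : t ≤ layer.length) (hi : i < t)
    (ho : openB layer t i = true) : cntW layer t (gV layer i) % 2 = 1 := by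
  rw [openB, Bool.and_eq_true, isOpB, Bool.and_eq_true] at ho
  obtain ⟨⟨_, heven⟩, hnocc⟩ := ho
  rw [beq_iff_eq] at heven
  have := cnt_adj hi ht rfl (noccB_iff.1 hnocc)
  omega

lemma adj_op_cl {layer : List Int} {k j : Nat} (hop : isOpB layer k = true)
    (hn : nxtO layer k = some j) :
    j < layer.length ∧ k < j ∧ gV layer j = gV layer k ∧ isClB layer j = true ∧
      prvO layer j = some k := by
  obtain ⟨hkj, hjn, hv, hno⟩ := nxtO_some_iff.1 hn
  rw [isOpB, Bool.and_eq_true] at hop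
  obtain ⟨hne, heven⟩ := hop
  rw [beq_iff_eq] at heven
  rw [bne_iff_ne] at hne
  have hcnt : cntW layer j (gV layer k) = cntW layer k (gV layer k) + 1 :=
    cnt_adj hkj (by omega) rfl hno
  refine ⟨hjn, hkj, hv, ?_, ?_⟩
  · rw [isClB, Bool.and_eq_true]
    constructor
    · simp [hv, hne]
    · simp only [beq_iff_eq, hv]
      omega
  · rw [prvO]
    rw [lstO_some_iff]
    refine ⟨hkj, by rw [hv], ?_⟩
    intro m h1 h2
    rw [hv]
    exact hno m h1 h2

lemma adj_cl_op {layer : List Int} {j i : Nat} (hj : j < layer.length) (hcl : isClB layer j = true)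
    (hp : prvO layer j = some i) :
    i < j ∧ gV layer i = gV layer j ∧ isOpB layer i = true ∧ nxtO layer i = some j := by
  rw [prvO] at hp
  obtain ⟨hij, hv, hmax⟩ := lstO_some_iff.1 hp
  rw [isClB, Bool.and_eq_true] at hcl
  obtain ⟨hne, hodd⟩ := hcl
  rw [beq_iff_eq] at hodd
  rw [bne_iff_ne] at hne
  have hcnt : cntW layer j (gV layer j) = cntW layer i (gV layer j) + 1 :=
    cnt_adj hij (by omega) hv hmax
  refine ⟨hij, hv, ?_, ?_⟩
  · rw [isOpB, Bool.and_eq_true]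
    constructor
    · simp [hv, hne]
    · simp only [beq_iff_eq, hv]
      omega
  · rw [nxtO_some_iff]
    refine ⟨hij, hj, hv.symm, ?_⟩
    intro m h1 h2 hm
    rw [hv] at hm
    exact hmax m h1 h2 hm

lemma openB_succ {layer : List Int} {t i : Nat} (hi : i < t) :
    openB layer (t+1) i = (openB layer t i && (gV layer t != gV layer i)) := by
  unfold openB noccB
  have h1 : t + 1 - (i+1) = (t - (i+1)) + 1 := by omega
  rw [h1, List.range'_concat]
  have h2 : i + 1 + 1 * (t - (i+1)) = t := by omega
  rw [h2, List.all_append]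
  simp [Bool.and_assoc]

lemma openB_self {layer : List Int} {t : Nat} : openB layer (t+1) t = isOpB layer t := by
  unfold openB noccB
  simp

lemma pyRange_natCast (a b : Nat) :
    PySem.List.pyRange (a:Int) (b:Int) = (List.range' a (b - a)).map (fun m : Nat => (m:Int)) := by
  have key : ∀ (d a : Nat), b - a = d →
      PySem.List.pyRange (a:Int) (b:Int) = (List.range' a d).map (fun m : Nat => (m:Int)) := by
    intro d
    induction d with
    | zero =>
      intro a ha
      rw [List.range'_zero, List.map_nil]
      exact PySem.List.pyRange_one_eq_nil (by exact_mod_cast Nat.le_of_sub_eq_zero ha)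
    | succ d ih =>
      intro a ha
      have hab : a < b := by omega
      rw [PySem.List.pyRange_one_cons (by exact_mod_cast hab), List.range'_succ, List.map_cons]
      have hcast : ((a:Int) + 1) = ((a+1 : Nat) : Int) := by push_cast; ring
      rw [hcast, ih (a+1) (by omega)]
  exact key (b - a) a rfl

lemma chkS_getD {layer : List Int} {t j : Nat} (hj : j < layer.length) :
    (chkS layer t).getD j 0 = chkF layer t j := by
  unfold chkS
  have hlen : j < ((List.range layer.length).map (chkF layer t)).length := by
    simpa using hj
  rw [List.getD_eq_getElem _ 0 hlen]
  simp

lemma scan_spec (layer : List Int) (v : Int) (checked : List Int) (a : Nat) :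
    getGatesScan layer v ((List.range' a (layer.length - a)).map (fun m : Nat => (m:Int))) checked =
      match (List.range' a (layer.length - a)).find? (fun m => gV layer m == v) with
      | some j => (checked.set j 1, some (j:Int))
      | none => (checked, none) := by
  have key : ∀ (d a : Nat), layer.length - a = d →
      getGatesScan layer v ((List.range' a d).map (fun m : Nat => (m:Int))) checked =
        match (List.range' a d).find? (fun m => gV layer m == v) with
        | some j => (checked.set j 1, some (j:Int))
        | none => (checked, none) := by
    intro d
    induction d with
    | zero =>
      intro a _
      simp [getGatesScan]
    | succ d ih =>
      intro a ha
      rw [List.range'_succ, List.map_cons]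
      show (if PySem.List.pyGetD layer (a:Int) 0 = v then _ else _) = _
      rw [PySem.List.pyGetD_natCast]
      by_cases hv : layer.getD a 0 = v
      · rw [if_pos hv, List.find?_cons_of_pos (by simpa [gV, List.getD_eq_getElem?_getD] using hv)]
        simp
      · rw [if_neg hv, List.find?_cons_of_neg (by simpa [gV, List.getD_eq_getElem?_getD] using hv), ih (a+1) (by omega)]
  exact key (layer.length - a) a rfl

lemma filterMap_range_succ {α : Type} (f : Nat → Option α) (t : Nat) :
    (List.range (t+1)).filterMap f = (List.range t).filterMap f ++ (f t).toList := by
  rw [List.range_succ, List.filterMap_append]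
  cases h : f t <;> simp [h]

lemma open_ne_neg1 {layer : List Int} {t i : Nat} (h : openB layer t i = true) :
    gV layer i ≠ -1 := by
  rw [openB, Bool.and_eq_true, isOpB, Bool.and_eq_true] at h
  exact bne_iff_ne.1 h.1.1

lemma isClB_not_isOpB {layer : List Int} {t : Nat} (h : isClB layer t = true) :
    isOpB layer t = false := by
  rw [isClB, Bool.and_eq_true] at h
  rw [isOpB]
  have := beq_iff_eq.1 h.2
  simp only [Bool.and_eq_false_iff]
  right
  simp [this]

lemma fC_fst {layer : List Int} {k : Nat} {x : Int × Int × Int} (h : fC layer k = some x) :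
    x.1 = (k:Int) := by
  rw [fC] at h
  split at h
  · rcases Option.map_eq_some_iff.1 h with ⟨j, _, rfl⟩
    rfl
  · exact absurd h (by simp)

lemma fP_snd {layer : List Int} {j : Nat} {x : Int × Int × Int} (h : fP layer j = some x) :
    x.2.1 = (j:Int) := by
  rw [fP] at h
  split at h
  · rcases Option.map_eq_some_iff.1 h with ⟨i, _, rfl⟩
    rfl
  · exact absurd h (by simp)

lemma chkF_self {layer : List Int} {t : Nat} :
    chkF layer t t = if isClB layer t then 1 else 0 := by
  rw [chkF]
  by_cases hcl : isClB layer t = true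
  · rw [isClB, Bool.and_eq_true] at hcl
    have hodd := beq_iff_eq.1 hcl.2
    have hne : cntW layer t (gV layer t) ≠ 0 := by omega
    obtain ⟨i0, hi0t, _, hi0v⟩ := cnt_pos_exists hne
    have hsome : (prvO layer t).isSome = true := by
      rw [prvO, lstO, List.find?_isSome]
      exact ⟨i0, by simp [List.mem_range, hi0t], by simp [hi0v]⟩
    rcases Option.isSome_iff_exists.1 hsome with ⟨i, hi⟩
    obtain ⟨hit, _, _⟩ := lstO_some_iff.1 hi
    simp [hi, hit, isClB, hcl.1, hcl.2]
  · simp [hcl]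

lemma chkF_succ_ne {layer : List Int} {t m : Nat}
    (hnocl : isClB layer m = true → prvO layer m ≠ some t) :
    chkF layer (t+1) m = chkF layer t m := by
  unfold chkF
  by_cases hcl : isClB layer m = true
  · cases hp : prvO layer m with
    | none => rfl
    | some i =>
      have hit : i ≠ t := fun he => hnocl hcl (he ▸ hp)
      have : (i < t+1) = (i < t) := propext (by omega)
      simp [this]
  · simp [hcl]

lemma chkS_succ_eq {layer : List Int} {t : Nat}
    (h : ∀ j, j < layer.length → isClB layer j = true → prvO layer j ≠ some t) :
    chkS layer (t+1) = chkS layer t := by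
  unfold chkS
  apply List.map_congr_left
  intro j hj
  rw [List.mem_range] at hj
  exact chkF_succ_ne (h j hj)

lemma gv_pyGetD {layer : List Int} (t : Nat) :
    PySem.List.pyGetD layer (t:Int) 0 = gV layer t := by
  rw [PySem.List.pyGetD_natCast]; rfl

lemma A_loop (layer : List Int) (t : Nat) (ht : t ≤ layer.length) :
    (List.range t).foldl (fun st (k : Nat) => stepA layer st (k:Int)) ([], [], chkS layer 0) =
      ((canCt layer t).map pairToL3, (canSt layer t).map pairToL2, chkS layer t) := by
  induction t with
  | zero => simp [canCt, canSt]
  | succ t ih =>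
    have htn : t < layer.length := ht
    rw [List.range_succ, List.foldl_append, ih (by omega)]
    simp only [List.foldl_cons, List.foldl_nil]
    show stepA layer _ (t:Int) = _
    unfold stepA
    simp only []
    rw [gv_pyGetD, PySem.List.pyGetD_natCast, chkS_getD htn, chkF_self]
    by_cases hskip : gV layer t = -1 ∨ isClB layer t = true
    · have hcond : gV layer t = -1 ∨ (if isClB layer t then (1:Int) else 0) ≠ 0 := by
        rcases hskip with h | h
        · exact Or.inl h
        · right; rw [if_pos h]; norm_num
      rw [if_pos hcond]
      have hop : isOpB layer t = false := by
        rcases hskip with h | h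
        · rw [isOpB, Bool.and_eq_false_iff]; left; simp [h]
        · exact isClB_not_isOpB h
      have hC : canCt layer (t+1) = canCt layer t := by
        rw [canCt, filterMap_range_succ, fC, if_neg (by simp [hop])]
        simp [canCt]
      have hS : canSt layer (t+1) = canSt layer t := by
        rw [canSt, filterMap_range_succ, fS, hop]
        simp [canSt]
      have hchk : chkS layer (t+1) = chkS layer t := by
        apply chkS_succ_eq
        intro j hj hcl hp
        rcases hskip with hneg | hclt
        · obtain ⟨_, hvt, _⟩ := lstO_some_iff.1 hp
          rw [isClB, Bool.and_eq_true, bne_iff_ne] at hcl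
          exact hcl.1 (by rw [← hvt, hneg])
        · obtain ⟨_, _, hopt, _⟩ := adj_cl_op hj hcl hp
          rw [isClB_not_isOpB hclt] at hopt
          exact Bool.false_ne_true hopt
      rw [hC, hS, hchk]
    · rw [not_or] at hskip
      obtain ⟨hne1, hncl⟩ := hskip
      have hncl' : isClB layer t = false := by simpa using hncl
      have hop : isOpB layer t = true := by
        rw [isOpB, Bool.and_eq_true]
        refine ⟨by simp [hne1], ?_⟩
        rw [isClB, Bool.and_eq_false_iff] at hncl'
        rcases hncl' with h | h
        · exact absurd (by simpa using h) hne1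
        · have hne : cntW layer t (gV layer t) % 2 ≠ 1 := by simpa using h
          simp only [beq_iff_eq]
          omega
      rw [if_neg (by rw [hncl']; simp [hne1])]
      have hlen : PySem.List.len layer = ((layer.length : Nat) : Int) := rfl
      have hc : ((t:Int) + 1) = (((t+1 : Nat)) : Int) := by push_cast; ring
      rw [hlen, hc, pyRange_natCast (t+1) layer.length, scan_spec]
      have hnx_eq : (List.range' (t+1) (layer.length - (t+1))).find?
          (fun m => gV layer m == gV layer t) = nxtO layer t := rfl
      rw [hnx_eq]
      cases hnx : nxtO layer t with
      | some j =>
        simp only []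
        obtain ⟨hjn, htj, hvj, hclj, hprvj⟩ := adj_op_cl hop hnx
        have hC : canCt layer (t+1) = canCt layer t ++ [((t:Int), (j:Int), gV layer t)] := by
          rw [canCt, filterMap_range_succ, fC, if_pos hop, hnx]
          simp [canCt]
        have hS : canSt layer (t+1) = canSt layer t := by
          rw [canSt, filterMap_range_succ, fS, hnx]
          simp [canSt]
        have hchk : (chkS layer t).set j 1 = chkS layer (t+1) := by
          apply List.ext_getElem
          · simp [chkS]
          · intro m hm1 hm2
            have hmn : m < layer.length := by simpa [chkS] using hm2
            rw [List.getElem_set]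
            simp only [chkS, List.getElem_map, List.getElem_range]
            by_cases hjm : j = m
            · subst hjm
              rw [if_pos rfl, chkF, if_pos]
              rw [hclj, hprvj]
              simp
            · rw [if_neg hjm]
              apply (chkF_succ_ne _).symm
              intro hcl hp
              obtain ⟨_, _, _, hnxm⟩ := adj_cl_op hmn hcl hp
              rw [hnx] at hnxm
              exact hjm (by simpa using hnxm)
        rw [hC, hS, ← hchk]
        simp [pairToL3]
      | none =>
        simp only []
        have hC : canCt layer (t+1) = canCt layer t := by
          rw [canCt, filterMap_range_succ, fC, if_pos hop, hnx]
          simp [canCt]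
        have hS : canSt layer (t+1) = canSt layer t ++ [((t:Int), gV layer t)] := by
          rw [canSt, filterMap_range_succ, fS, hnx, hop]
          simp [canSt]
        have hchk : chkS layer (t+1) = chkS layer t := by
          apply chkS_succ_eq
          intro m hm hcl hp
          obtain ⟨_, _, _, hnxm⟩ := adj_cl_op hm hcl hp
          rw [hnx] at hnxm
          simp at hnxm
        rw [hC, hS, hchk]
        simp [pairToL2]

lemma get_gates_eq (layer : List Int) :
    get_gates layer =
      ((canSt layer layer.length).map pairToL2, (canCt layer layer.length).map pairToL3) := by
  show ((((PySem.List.pyRange 0 (PySem.List.len layer)).foldl (stepA layer)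
      ([], [], (PySem.List.pyRange 0 (PySem.List.len layer)).map (fun _ => 0))).2.1,
      ((PySem.List.pyRange 0 (PySem.List.len layer)).foldl (stepA layer)
      ([], [], (PySem.List.pyRange 0 (PySem.List.len layer)).map (fun _ => 0))).1)) = _
  have hlen : PySem.List.len layer = ((layer.length : Nat) : Int) := rfl
  rw [hlen, PySem.List.pyRange_zero_natCast, List.foldl_map, List.map_map]
  have hinit : (List.range layer.length).map ((fun _ => (0:Int)) ∘ (fun k : Nat => (k:Int))) =
      chkS layer 0 := by
    apply List.map_congr_left
    intro j hj
    rw [List.mem_range] at hj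
    unfold chkF
    cases hp : prvO layer j with
    | none => simp
    | some i => simp
  rw [hinit, A_loop layer layer.length le_rfl]

lemma fI_eq_some {layer : List Int} {t i : Nat} {x : Int × Int} :
    fI layer t i = some x ↔ (openB layer t i = true ∧ x = (gV layer i, (i:Int))) := by
  unfold fI
  by_cases h : openB layer t i = true
  · simp [h, eq_comm]
  · simp [h]

lemma fS_fst {layer : List Int} {k : Nat} {x : Int × Int} (h : fS layer k = some x) :
    x.1 = (k:Int) := by
  rw [fS] at h
  split at h
  · injection h with h
    subst h
    rfl
  · exact absurd h (by simp)

lemma nodup_keys_itemsS (layer : List Int) (t : Nat) :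
    (PySem.Dict.mk (itemsS layer t)).keys.Nodup := by
  rw [PySem.Dict.keys_mk]
  have hpw : (itemsS layer t).Pairwise (fun p q : Int × Int => p.1 ≠ q.1) := by
    rw [itemsS, List.pairwise_filterMap]
    have hbase : (List.range t).Pairwise
        (fun a b => a ∈ List.range t ∧ b ∈ List.range t ∧ a < b) :=
      List.Pairwise.and_mem.1 List.pairwise_lt_range
    refine hbase.imp ?_
    rintro a b ⟨ha, hb, hab⟩ x hx y hy
    rw [List.mem_range] at ha hb
    rcases fI_eq_some.1 hx with ⟨hoa, rfl⟩
    rcases fI_eq_some.1 hy with ⟨hob, rfl⟩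
    intro he
    exact absurd (open_unique hoa hob he ha hb) (by omega)
  exact List.pairwise_map.2 hpw

lemma B_loop (layer : List Int) (t : Nat) (ht : t ≤ layer.length) :
    (List.range t).foldl (fun st (k : Nat) => stepB st ((k:Int), gV layer k)) (PySem.Dict.empty, []) =
      (PySem.Dict.mk (itemsS layer t), pairsS layer t) := by
  induction t with
  | zero => simp [itemsS, pairsS]; rfl
  | succ t ih =>
    have htn : t < layer.length := ht
    rw [List.range_succ, List.foldl_append, ih (by omega)]
    simp only [List.foldl_cons, List.foldl_nil]
    show stepB _ ((t:Int), gV layer t) = _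
    unfold stepB
    simp only []
    by_cases hneg : gV layer t = -1
    · rw [if_pos hneg]
      have hI : itemsS layer (t+1) = itemsS layer t := by
        rw [itemsS, filterMap_range_succ]
        have h0 : fI layer (t+1) t = none := by
          unfold fI
          rw [openB_self, isOpB]
          simp [hneg]
        rw [h0]
        simp only [Option.toList_none, List.append_nil]
        apply List.filterMap_congr
        intro i hi
        rw [List.mem_range] at hi
        unfold fI
        rw [openB_succ hi]
        by_cases ho : openB layer t i = true
        · have hne : (gV layer t != gV layer i) = true := by
            rw [bne_iff_ne, hneg]
            exact fun he => open_ne_neg1 ho he.symm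
          rw [ho, hne]
          rfl
        · have ho' : openB layer t i = false := by simpa using ho
          rw [ho']
          simp
      have hP : pairsS layer (t+1) = pairsS layer t := by
        rw [pairsS, filterMap_range_succ, fP]
        have hcl : isClB layer t = false := by rw [isClB]; simp [hneg]
        rw [hcl]
        simp [pairsS]
      rw [hI, hP]
    · rw [if_neg hneg]
      have hnod : (PySem.Dict.mk (itemsS layer t)).keys.Nodup := nodup_keys_itemsS layer t
      have hpar : cntW layer t (gV layer t) % 2 = 0 ∨ cntW layer t (gV layer t) % 2 = 1 := by omega
      rcases hpar with hev | hodd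
      · have hget : (PySem.Dict.mk (itemsS layer t)).get? (gV layer t) = none := by
          rw [PySem.Dict.get?_eq_none_iff_not_mem_keys]
          intro hmem
          rw [PySem.Dict.keys_mk, List.mem_map] at hmem
          rcases hmem with ⟨p, hp, hp1⟩
          rw [itemsS, List.mem_filterMap] at hp
          rcases hp with ⟨m, hm, hfm⟩
          rw [List.mem_range] at hm
          rcases fI_eq_some.1 hfm with ⟨ho, rfl⟩
          have := odd_of_open (by omega) hm ho
          rw [show gV layer m = gV layer t from hp1] at this
          omega
        rw [hget]
        have hcont : (PySem.Dict.mk (itemsS layer t)).contains (gV layer t) = false := by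
          rw [PySem.Dict.contains_eq_isSome_get?, hget]
          rfl
        have h1 : (PySem.Dict.mk (itemsS layer t)).insert (gV layer t) (t:Int) =
            PySem.Dict.mk (itemsS layer (t+1)) := by
          apply PySem.Dict.ext
          rw [PySem.Dict.items_insert_of_not_contains _ _ hcont]
          show itemsS layer t ++ [(gV layer t, (t:Int))] = itemsS layer (t+1)
          rw [itemsS, itemsS, filterMap_range_succ]
          congr 1
          · apply List.filterMap_congr
            intro i hi
            rw [List.mem_range] at hi
            unfold fI
            rw [openB_succ hi]
            by_cases ho : openB layer t i = true
            · have hne : (gV layer t != gV layer i) = true := by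
                rw [bne_iff_ne]
                intro he
                have := odd_of_open (by omega) hi ho
                rw [← he] at this
                omega
              rw [ho, hne]
              rfl
            · have ho' : openB layer t i = false := by simpa using ho
              rw [ho']
              simp
          · unfold fI
            rw [openB_self]
            have hopt : isOpB layer t = true := by rw [isOpB]; simp [hneg, hev]
            rw [hopt]
            simp
        have h2 : pairsS layer (t+1) = pairsS layer t := by
          rw [pairsS, filterMap_range_succ, fP]
          have hcl : isClB layer t = false := by rw [isClB]; simp [hev]
          rw [hcl]
          simp [pairsS]
        rw [h1, h2]
      · obtain ⟨i, hlst, hit, hopen, hvi⟩ := open_of_odd (by omega) hneg hodd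
        have hmem : (gV layer t, (i:Int)) ∈ itemsS layer t := by
          rw [itemsS, List.mem_filterMap]
          refine ⟨i, by simp [List.mem_range, hit], ?_⟩
          exact fI_eq_some.2 ⟨hopen, by rw [hvi]⟩
        have hget : (PySem.Dict.mk (itemsS layer t)).get? (gV layer t) = some (i:Int) :=
          PySem.Dict.get?_of_mem_items _ hmem hnod
        rw [hget]
        have h1 : (PySem.Dict.mk (itemsS layer t)).erase (gV layer t) =
            PySem.Dict.mk (itemsS layer (t+1)) := by
          apply PySem.Dict.ext
          show (itemsS layer t).filter (fun p => !(p.1 == gV layer t)) = itemsS layer (t+1)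
          rw [itemsS, itemsS, List.filter_filterMap, filterMap_range_succ]
          have h0 : fI layer (t+1) t = none := by
            unfold fI
            rw [openB_self]
            have : isOpB layer t = false := by rw [isOpB]; simp [hodd]
            rw [this]
            simp
          rw [h0]
          simp only [Option.toList_none, List.append_nil]
          apply List.filterMap_congr
          intro m hm
          rw [List.mem_range] at hm
          unfold fI
          rw [openB_succ hm]
          by_cases ho : openB layer t m = true
          · rw [ho]
            by_cases hvm : gV layer m = gV layer t
            · have hb : (gV layer t != gV layer m) = false := by simp [hvm]
              rw [hb]
              simp [Option.filter, hvm]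
            · have hb : (gV layer t != gV layer m) = true := by simp [Ne.symm hvm]
              rw [hb]
              simp [Option.filter, hvm]
          · have ho' : openB layer t m = false := by simpa using ho
            rw [ho']
            simp [Option.filter]
        have h2 : pairsS layer (t+1) = pairsS layer t ++ [((i:Int), (t:Int), gV layer t)] := by
          rw [pairsS, filterMap_range_succ, fP]
          have hcl : isClB layer t = true := by rw [isClB]; simp [hneg, hodd]
          rw [hcl]
          rw [show prvO layer t = some i from hlst]
          simp [pairsS]
        rw [h1, h2]

lemma openB_top {layer : List Int} {i : Nat} :
    openB layer layer.length i = (isOpB layer i && (nxtO layer i).isNone) := by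
  unfold openB
  congr 1
  cases h : nxtO layer i with
  | none =>
    simp only [Option.isNone_none]
    exact noccB_iff.2 (nxtO_none_iff.1 h)
  | some j =>
    simp only [Option.isNone_some]
    obtain ⟨hij, hjn, hvj, _⟩ := nxtO_some_iff.1 h
    rw [Bool.eq_false_iff]
    intro hb
    exact (noccB_iff.1 hb) j hij hjn hvj

lemma mem_canC_iff {layer : List Int} {x : Int × Int × Int} :
    x ∈ canCt layer layer.length ↔ x ∈ pairsS layer layer.length := by
  unfold canCt pairsS
  simp only [List.mem_filterMap, List.mem_range]
  constructor
  · rintro ⟨k, hk, hfc⟩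
    rw [fC] at hfc
    by_cases hop : isOpB layer k = true
    · rw [if_pos hop] at hfc
      rcases Option.map_eq_some_iff.1 hfc with ⟨j, hj, rfl⟩
      obtain ⟨hjn, hkj, hvj, hcl, hprv⟩ := adj_op_cl hop hj
      refine ⟨j, hjn, ?_⟩
      rw [fP, if_pos hcl, hprv, Option.map_some]
      rw [hvj]
    · rw [if_neg hop] at hfc
      exact absurd hfc (by simp)
  · rintro ⟨j, hj, hfp⟩
    rw [fP] at hfp
    by_cases hcl : isClB layer j = true
    · rw [if_pos hcl] at hfp
      rcases Option.map_eq_some_iff.1 hfp with ⟨i, hi, rfl⟩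
      obtain ⟨hij, hvi, hop, hnxt⟩ := adj_cl_op hj hcl hi
      refine ⟨i, by omega, ?_⟩
      rw [fC, if_pos hop, hnxt, Option.map_some]
      rw [hvi]
    · rw [if_neg hcl] at hfp
      exact absurd hfp (by simp)

lemma get_gates_alt_eq (layer : List Int) :
    get_gates_alt layer =
      ((canSt layer layer.length).map pairToL2, (canCt layer layer.length).map pairToL3) := by
  have hfold : (PySem.List.enumerate layer).foldl stepB (PySem.Dict.empty, []) =
      (PySem.Dict.mk (itemsS layer layer.length), pairsS layer layer.length) := by
    rw [PySem.List.enumerate_eq_map_pyRange layer 0,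
      show PySem.List.len layer = ((layer.length : Nat) : Int) from rfl,
      PySem.List.pyRange_zero_natCast, List.map_map, List.foldl_map]
    have hfun : (fun (st : PySem.Dict Int Int × List (Int × Int × Int)) (k : Nat) =>
        stepB st (((fun j => (j, PySem.List.pyGetD layer j 0)) ∘ fun k : Nat => (k:Int)) k)) =
        (fun st (k : Nat) => stepB st ((k:Int), gV layer k)) := by
      funext st k
      simp only [Function.comp]
      rw [gv_pyGetD]
    rw [hfun]
    exact B_loop layer layer.length le_rfl
  have pwC : (canCt layer layer.length).Pairwise
      (fun a b : Int × Int × Int => a.1 < b.1) := by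
    rw [canCt, List.pairwise_filterMap]
    refine List.pairwise_lt_range.imp ?_
    intro a b hab x hx y hy
    rw [fC_fst hx, fC_fst hy]
    exact_mod_cast hab
  have pwP : (pairsS layer layer.length).Pairwise
      (fun a b : Int × Int × Int => a.2.1 < b.2.1) := by
    rw [pairsS, List.pairwise_filterMap]
    refine List.pairwise_lt_range.imp ?_
    intro a b hab x hx y hy
    rw [fP_snd hx, fP_snd hy]
    exact_mod_cast hab
  have hpairs : PySem.List.sorted (pairsS layer layer.length)
      (fun p : Int × Int × Int => p.1) = canCt layer layer.length := by
    apply PySem.List.sorted_eq_of_perm_of_pairwise_lt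
    · rw [List.perm_ext_iff_of_nodup
        (pwC.imp (fun {a b} h he => absurd (he ▸ h) (lt_irrefl _)))
        (pwP.imp (fun {a b} h he => absurd (he ▸ h) (lt_irrefl _)))]
      intro a
      exact mem_canC_iff
    · exact pwC
  have hmap : (itemsS layer layer.length).map (fun p : Int × Int => (p.2, p.1)) =
      canSt layer layer.length := by
    rw [itemsS, canSt, List.map_filterMap]
    apply List.filterMap_congr
    intro i hi
    unfold fI fS
    rw [openB_top]
    by_cases h : (isOpB layer i && (nxtO layer i).isNone) = true
    · rw [h]
      simp
    · have h' : (isOpB layer i && (nxtO layer i).isNone) = false := by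
        rw [Bool.eq_false_iff]
        exact h
      rw [h']
      simp
  have pwS : (canSt layer layer.length).Pairwise
      (fun a b : Int × Int => a.1 < b.1) := by
    rw [canSt, List.pairwise_filterMap]
    refine List.pairwise_lt_range.imp ?_
    intro a b hab x hx y hy
    rw [fS_fst hx, fS_fst hy]
    exact_mod_cast hab
  have hopens : PySem.List.sorted ((itemsS layer layer.length).map
      (fun p : Int × Int => (p.2, p.1))) (fun p : Int × Int => p.1) =
      canSt layer layer.length := by
    rw [hmap]
    exact PySem.List.sorted_eq_of_perm_of_pairwise_lt _ _ _ (List.Perm.refl _) pwS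
  show ((fun st : PySem.Dict Int Int × List (Int × Int × Int) =>
      ((PySem.List.sorted (st.1.items.map (fun p : Int × Int => (p.2, p.1)))
          (fun p : Int × Int => p.1)).map (fun p => [p.1, p.2]),
        (PySem.List.sorted st.2 (fun p : Int × Int × Int => p.1)).map
          (fun p => [p.1, p.2.1, p.2.2])))
      ((PySem.List.enumerate layer).foldl stepB (PySem.Dict.empty, []))) = _
  rw [hfold]
  simp only []
  show ((PySem.List.sorted ((itemsS layer layer.length).map (fun p : Int × Int => (p.2, p.1)))
      (fun p : Int × Int => p.1)).map (fun p => [p.1, p.2]),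
    (PySem.List.sorted (pairsS layer layer.length) (fun p : Int × Int × Int => p.1)).map
      (fun p => [p.1, p.2.1, p.2.2])) = _
  rw [hpairs, hopens]
  rfl

-- ===== VERDICT (by name: the statement is the Claim_ definition above) =====
theorem get_gates_spec : Claim_equal_get_gates := by
  intro layer _
  unfold Spec_get_gates
  rw [get_gates_eq, get_gates_alt_eq]
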